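-- pv_equiv track=rewrite | github.com/pypi-data/pypi-mirror-398 | packages/el-loom/el_loom-0.4.0-cp312-cp312-manylinux_2_39_x86_64.whl/loom/eka/utilities/validation_tools.py | coordinate_length_error
-- ===== SOURCE A (Python) =====
-- def coordinate_length_error(
--     list_of_coordinates: tuple[tuple, ...],
-- ) -> tuple[tuple, ...]:
--     """
--     Check if the length of the lists in the list are consistent.
--     """
--     if len(list_of_coordinates) != 0:
--         length = len(list_of_coordinates[0])
--     for item in list_of_coordinates:
--         if len(item) != length:
--             raise ValueError("Length of coordinates must be consistent.")
--
--     return list_of_coordinates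
-- ===== SOURCE B (Python) =====
-- def coordinate_length_error(
--     list_of_coordinates: tuple[tuple, ...],
-- ) -> tuple[tuple, ...]:
--     lengths = {len(t) for t in list_of_coordinates}
--     if len(lengths) > 1:
--         raise ValueError("Length of coordinates must be consistent.")
--     return list_of_coordinates
-- ===== Notes on version B (the rewrite author's own statement) =====
-- stated objective: idiomatic
-- what changed: B aggregates the distinct tuple lengths into a set in one comprehension and decides once (raise iff more than one distinct length) instead of A's per-item comparison against the first tuple's length with early exit.
import Mathlib
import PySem

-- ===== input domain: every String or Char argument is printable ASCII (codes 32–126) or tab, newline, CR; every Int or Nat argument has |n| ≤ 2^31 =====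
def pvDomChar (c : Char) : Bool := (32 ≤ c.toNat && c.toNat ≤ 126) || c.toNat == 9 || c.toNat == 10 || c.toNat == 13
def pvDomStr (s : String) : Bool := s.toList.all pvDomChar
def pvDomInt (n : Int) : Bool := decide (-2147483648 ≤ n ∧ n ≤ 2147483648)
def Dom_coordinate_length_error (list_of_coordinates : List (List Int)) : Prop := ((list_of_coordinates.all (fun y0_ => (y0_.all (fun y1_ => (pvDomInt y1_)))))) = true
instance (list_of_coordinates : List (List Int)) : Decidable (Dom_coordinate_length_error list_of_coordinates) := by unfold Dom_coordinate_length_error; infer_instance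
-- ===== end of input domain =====

-- B decides once on the set of distinct tuple lengths instead of comparing each item
-- to the first tuple's length with early exit; objective: idiomatic, same cost.
-- Equivalence is about the RETURN value on inputs where A returns (no ValueError).

-- ===== PORT A =====
-- A: take the first item's length as reference, scan all items, raise on mismatch.
def coordinate_length_error (list_of_coordinates : List (List Int)) : List (List Int) :=
  match list_of_coordinates with
  | [] => list_of_coordinates
  | h :: _ =>
    if list_of_coordinates.all (fun item => item.length == h.length) then
      list_of_coordinates
    else
      []  -- Python raises ValueError here; unreachable inside Pre_

-- ===== PORT B =====
-- B: build the set of distinct lengths, raise iff it has more than one element.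
def coordinate_length_error_alt (list_of_coordinates : List (List Int)) : List (List Int) :=
  let lengths := PySem.Set.ofList (list_of_coordinates.map (fun t => (t.length : Int)))
  if lengths.length > 1 then
    []  -- Python raises ValueError here; unreachable inside Pre_
  else
    list_of_coordinates

-- ===== PRECONDITION & SPEC =====
-- Pre_ excludes exactly the inputs on which Python A raises ValueError:
-- some item's length differs from the first item's length.
def Pre_coordinate_length_error (list_of_coordinates : List (List Int)) : Prop :=
  ∀ item ∈ list_of_coordinates, item.length = (list_of_coordinates.headD []).length
instance (list_of_coordinates : List (List Int)) : Decidable (Pre_coordinate_length_error list_of_coordinates) := by unfold Pre_coordinate_length_error; infer_instance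

def pvWitness_coordinate_length_error : List (List Int) := [[1, 2], [3, 4]]

def Spec_coordinate_length_error (list_of_coordinates : List (List Int)) (out : List (List Int)) : Prop := out = coordinate_length_error_alt list_of_coordinates
instance (list_of_coordinates : List (List Int)) (out : List (List Int)) : Decidable (Spec_coordinate_length_error list_of_coordinates out) := by unfold Spec_coordinate_length_error; infer_instance

-- ===== CLAIM (what is proved, stated in full; the proofs are below) =====
def Claim_equal_coordinate_length_error : Prop := ∀ (list_of_coordinates : List (List Int)), Dom_coordinate_length_error list_of_coordinates → Pre_coordinate_length_error list_of_coordinates → Spec_coordinate_length_error list_of_coordinates (coordinate_length_error list_of_coordinates)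

-- ===== LEMMAS AND PROOFS =====

-- ===== VERDICT (by name: the statement is the Claim_ definition above) =====
-- foldl-ing Set.add with copies of an element already present leaves the set unchanged
theorem pvSetAddReplicate (x : Int) (n : Nat) :
    List.foldl PySem.Set.add [x] (List.replicate n x) = [x] := by
  induction n with
  | zero => rfl
  | succ k ih => simpa [List.replicate_succ, PySem.Set.add, PySem.Set.contains] using ih

theorem coordinate_length_error_spec : Claim_equal_coordinate_length_error := by
  intro xs _ hpre
  unfold Spec_coordinate_length_error coordinate_length_error coordinate_length_error_alt
  cases xs with
  | nil => rfl
  | cons h t =>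
    have hlen : ∀ item ∈ h :: t, item.length = h.length := by
      intro item hm
      simpa [List.headD] using hpre item hm
    have hall : ((h :: t).all (fun item => item.length == h.length)) = true := by
      simp only [List.all_eq_true, beq_iff_eq]
      exact hlen
    have hmap : (h :: t).map (fun t => (t.length : Int)) =
        (h :: t).map (fun _ => (h.length : Int)) := by
      apply List.map_congr_left
      intro item hm
      exact congrArg (Int.ofNat) (hlen item hm)
    have hset : (PySem.Set.ofList ((h :: t).map (fun t => (t.length : Int)))).length ≤ 1 := by
      rw [hmap]; rw [show ((h :: t).map (fun _ => (h.length : Int))) = List.replicate (h :: t).length ((h.length : Int)) from by simp [List.replicate_succ]]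
      have : PySem.Set.ofList (List.replicate (h :: t).length ((h.length : Int))) = [(h.length : Int)] := by
        simp only [List.length_cons, List.replicate_succ, PySem.Set.ofList, List.foldl_cons]
        simpa [PySem.Set.add, PySem.Set.contains] using pvSetAddReplicate ((h.length : Int)) t.length
      rw [this]; simp
    simp only [hall, if_true]
    rw [if_neg (by omega)]
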